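-- pv_equiv track=rewrite | github.com/User-11234/user-11234.github.io | python/railFence_cypher.py | scramble2Text
-- ===== SOURCE A (Python) =====
-- def scramble2Text(plainText):
--
--     evenChars = ''
--     oddChars = ''
--
--     charCount = 0
--
--     for ch in plainText:
--
--         charCount += 1
--
--         if charCount % 2 is 0:
--             evenChars += ch
--         else:
--             oddChars += ch
--
--     cipherText = oddChars + evenChars
--
--     return cipherText
-- ===== SOURCE B (Python) =====
-- def scramble2Text(plainText):
--     return plainText[::2] + plainText[1::2]
-- ===== Notes on version B (the rewrite author's own statement) =====
-- stated objective: idiomatic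
-- what changed: Replaced the explicit loop with its counter and odd/even branch by two strided slices: the even-index slice plainText[::2] (A's oddChars) concatenated with the odd-index slice plainText[1::2] (A's evenChars).
import Mathlib
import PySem

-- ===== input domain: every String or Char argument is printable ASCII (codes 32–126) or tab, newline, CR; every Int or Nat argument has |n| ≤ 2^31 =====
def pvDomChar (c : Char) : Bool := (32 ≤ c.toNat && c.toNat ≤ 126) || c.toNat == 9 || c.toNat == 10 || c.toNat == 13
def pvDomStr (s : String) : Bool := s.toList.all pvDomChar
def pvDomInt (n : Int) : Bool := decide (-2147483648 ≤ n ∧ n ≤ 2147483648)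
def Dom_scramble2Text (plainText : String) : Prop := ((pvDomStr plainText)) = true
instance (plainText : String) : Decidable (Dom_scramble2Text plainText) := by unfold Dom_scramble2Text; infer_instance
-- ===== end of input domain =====

-- B replaces A's counting loop with two strided slices (plainText[::2] + plainText[1::2]); objective: idiomatic.

-- ===== PORT A =====
-- literal port of A's loop: state (evenChars, oddChars, charCount); strings kept as List Char, joined at the end
def scramble2Text (plainText : String) : String :=
  let r := plainText.toList.foldl
    (fun (st : List Char × List Char × Int) ch =>
      let evenChars := st.1
      let oddChars := st.2.1
      let charCount := st.2.2 + 1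
      if PySem.Int.mod charCount 2 = 0 then (evenChars ++ [ch], oddChars, charCount)
      else (evenChars, oddChars ++ [ch], charCount))
    ([], [], 0)
  String.ofList (r.2.1 ++ r.1)

-- ===== PORT B =====
-- literal port of B: the two slices plainText[::2] and plainText[1::2], concatenated
def scramble2Text_alt (plainText : String) : String :=
  String.ofList (((PySem.Chars.slice? plainText.toList none none 2).getD []) ++
                 ((PySem.Chars.slice? plainText.toList (some 1) none 2).getD []))

-- ===== PRECONDITION & SPEC =====
def Spec_scramble2Text (plainText : String) (out : String) : Prop := out = scramble2Text_alt plainText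
instance (plainText : String) (out : String) : Decidable (Spec_scramble2Text plainText out) := by unfold Spec_scramble2Text; infer_instance

-- ===== CLAIM (what is proved, stated in full; the proofs are below) =====
def Claim_equal_scramble2Text : Prop := ∀ (plainText : String), Dom_scramble2Text plainText → Spec_scramble2Text plainText (scramble2Text plainText)

-- ===== LEMMAS AND PROOFS =====

-- the elements at even 0-based positions
def pvEvens {α : Type} : List α → List α
  | [] => []
  | [a] => [a]
  | a :: _ :: t => a :: pvEvens t

theorem pvEvens_cons {α : Type} (a : α) (t : List α) :
    pvEvens (a :: t) = a :: pvEvens t.tail := by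
  cases t <;> simp [pvEvens]

theorem pvEvens_filterMap {α : Type} (xs : List α) :
    List.filterMap (fun k => xs[2*k]?) (List.range ((xs.length+1)/2)) = pvEvens xs := by
  induction xs using pvEvens.induct with
  | case1 => simp [pvEvens]
  | case2 a => simp [pvEvens]
  | case3 a b t ih =>
      have h : (a :: b :: t).length + 1 = t.length + 1 + 2 := by simp
      rw [h]
      have h2 : (t.length + 1 + 2) / 2 = (t.length+1)/2 + 1 := by omega
      rw [h2, List.range_succ_eq_map, List.filterMap_cons, List.filterMap_map]
      simp only [Function.comp]
      have h3 : ∀ k : ℕ, (a :: b :: t)[2 * (k+1)]? = t[2*k]? := by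
        intro k
        have : 2 * (k+1) = 2*k + 2 := by omega
        simp [this]
      simp only [Nat.succ_eq_add_one, h3]
      simp [pvEvens, ih]

theorem pvSlice2_none {α : Type} (xs : List α) :
    PySem.List.slice? xs none none 2 = some (pvEvens xs) := by
  rw [← pvEvens_filterMap]
  simp [PySem.List.slice?, PySem.List.sliceIndices]
  have hc : (if 0 < xs.length then (((xs.length : ℤ) + 2 - 1) / 2).toNat else 0) = (xs.length+1)/2 := by
    split <;> omega
  have hi : ∀ x : ℕ, (2*(x:ℤ)).toNat = 2*x := by intro x; omega
  rw [hc]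
  simp [hi]

theorem pvSlice2_one {α : Type} (xs : List α) :
    PySem.List.slice? xs (some 1) none 2 = some (pvEvens xs.tail) := by
  rw [← pvEvens_filterMap]
  cases xs with
  | nil => simp [PySem.List.slice?, PySem.List.sliceIndices]
  | cons a t =>
    simp [PySem.List.slice?, PySem.List.sliceIndices]
    have hc : (if 0 < t.length then (((t.length : ℤ) + 2 - 1)/2).toNat else 0) = (t.length+1)/2 := by
      split <;> omega
    have hi : ∀ x : ℕ, (1 + 2*(x:ℤ)).toNat = 2*x + 1 := by intro x; omega
    rw [hc]
    simp [hi]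

theorem pvMod_two (a : ℤ) : PySem.Int.mod a 2 = a % 2 := by
  simp [PySem.Int.mod]
  rw [Int.fmod_eq_emod_of_nonneg]
  omega

-- A's loop, started at an even count, routes even positions to oddChars and odd positions to evenChars
theorem pvFoldA (xs : List Char) : ∀ (e o : List Char) (c : Int), c % 2 = 0 →
    xs.foldl
      (fun (st : List Char × List Char × Int) ch =>
        let evenChars := st.1
        let oddChars := st.2.1
        let charCount := st.2.2 + 1
        if PySem.Int.mod charCount 2 = 0 then (evenChars ++ [ch], oddChars, charCount)
        else (evenChars, oddChars ++ [ch], charCount))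
      (e, o, c)
    = (e ++ pvEvens xs.tail, o ++ pvEvens xs, c + xs.length) := by
  induction xs using pvEvens.induct with
  | case1 => intro e o c hc; simp [pvEvens]
  | case2 a =>
      intro e o c hc
      simp only [List.foldl_cons, List.foldl_nil, pvMod_two]
      have h1 : ¬ ((c + 1) % 2 = 0) := by omega
      simp [h1, pvEvens]
  | case3 a b t ih =>
      intro e o c hc
      simp only [pvMod_two] at ih ⊢
      simp only [List.foldl_cons]
      have h1 : ¬ ((c + 1) % 2 = 0) := by omega
      have h2 : (c + 1 + 1) % 2 = 0 := by omega
      simp only [h1, h2, if_true, if_false]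
      rw [ih (e ++ [b]) (o ++ [a]) (c + 1 + 1) h2]
      refine Prod.ext ?_ (Prod.ext ?_ ?_)
      · simp [pvEvens_cons b t]
      · simp [pvEvens]
      · simp; omega

-- ===== VERDICT (by name: the statement is the Claim_ definition above) =====
theorem scramble2Text_spec : Claim_equal_scramble2Text := by
  intro s _
  unfold Spec_scramble2Text scramble2Text scramble2Text_alt
  simp only [PySem.Chars.slice?_eq_listSlice?, pvSlice2_none, pvSlice2_one, Option.getD_some]
  rw [pvFoldA s.toList [] [] 0 (by decide)]
  simp
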